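-- pv_equiv track=rewrite | github.com/kamalvhm/PySparkBasics | venv/pySpark/RDD/RddOperations.py | func
-- ===== SOURCE A (Python) =====
-- def func(iterator):
--     countSpark=0
--     countApache=0
--     for i in iterator:
--         if i=='spark':
--             countSpark+=1
--         if i=='apache':
--             countApache+=1
--     return countApache,countSpark
-- ===== SOURCE B (Python) =====
-- def func(iterator):
--     items = list(iterator)
--
--     def go(xs):
--         if not xs:
--             return (0, 0)
--         if len(xs) == 1:
--             x = xs[0]
--             return (1 if x == 'apache' else 0, 1 if x == 'spark' else 0)
--         mid = len(xs) // 2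
--         a1, s1 = go(xs[:mid])
--         a2, s2 = go(xs[mid:])
--         return (a1 + a2, s1 + s2)
--
--     return go(items)
-- ===== Notes on version B (the rewrite author's own statement) =====
-- stated objective: alternative
-- what changed: Replaces A's single left-to-right accumulator loop with a divide-and-conquer recursion that splits the materialized list in half, counts each half independently, and sums the two count pairs.
import Mathlib
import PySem

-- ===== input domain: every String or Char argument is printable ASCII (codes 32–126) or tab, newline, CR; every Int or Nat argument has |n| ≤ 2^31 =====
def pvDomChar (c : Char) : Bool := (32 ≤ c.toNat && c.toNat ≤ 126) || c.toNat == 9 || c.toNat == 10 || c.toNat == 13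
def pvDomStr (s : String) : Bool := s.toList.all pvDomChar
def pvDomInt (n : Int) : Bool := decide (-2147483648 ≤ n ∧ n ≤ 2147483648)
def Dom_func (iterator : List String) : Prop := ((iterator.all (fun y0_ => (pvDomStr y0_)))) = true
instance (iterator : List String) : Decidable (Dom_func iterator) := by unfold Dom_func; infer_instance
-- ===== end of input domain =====

-- B replaces A's single accumulator loop with a divide-and-conquer recursion over the halves of the list (alternative decomposition, same results).


-- ===== PORT A =====
-- literal transliteration of A's loop carrying (countSpark, countApache)
def func (iterator : List String) : Int × Int :=
  let st := iterator.foldl (fun (acc : Int × Int) i =>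
    let acc := if i == "spark" then (acc.1 + 1, acc.2) else acc
    if i == "apache" then (acc.1, acc.2 + 1) else acc) (0, 0)
  (st.2, st.1)

-- ===== PORT B =====
-- Source B's helper go: divide and conquer, splitting the list in half (xs[:mid] / xs[mid:])
def funcGo (xs : List String) : Int × Int :=
  if h0 : xs = [] then (0, 0)
  else if h1 : xs.length = 1 then
    let x := xs.headI
    ((if x = "apache" then 1 else 0), (if x = "spark" then 1 else 0))
  else
    let mid := xs.length / 2
    let l := funcGo (xs.take mid)
    let r := funcGo (xs.drop mid)
    (l.1 + r.1, l.2 + r.2)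
termination_by xs.length
decreasing_by
  all_goals {
    have h2 : 2 ≤ xs.length := by
      rcases xs with _ | ⟨a, _ | ⟨b, t⟩⟩
      · exact absurd rfl h0
      · exact absurd rfl h1
      · simp
    simp only [List.length_take, List.length_drop]
    omega }

def func_alt (iterator : List String) : Int × Int :=
  funcGo iterator

-- ===== PRECONDITION & SPEC =====
def Spec_func (iterator : List String) (out : Int × Int) : Prop := out = func_alt iterator
instance (iterator : List String) (out : Int × Int) : Decidable (Spec_func iterator out) := by unfold Spec_func; infer_instance

-- ===== CLAIM (what is proved, stated in full; the proofs are below) =====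
def Claim_equal_func : Prop := ∀ (iterator : List String), Dom_func iterator → Spec_func iterator (func iterator)

-- ===== LEMMAS AND PROOFS =====
theorem funcGo_eq_count (n : Nat) (xs : List String) (hn : xs.length = n) :
    funcGo xs = ((xs.count "apache" : Int), (xs.count "spark" : Int)) := by
  induction n using Nat.strong_induction_on generalizing xs with
  | _ n ih =>
    rw [funcGo]
    by_cases h0 : xs = []
    · subst h0; simp
    · rw [dif_neg h0]
      by_cases h1 : xs.length = 1
      · rw [dif_pos h1]
        obtain ⟨a, ha⟩ := List.length_eq_one_iff.mp h1
        subst ha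
        by_cases hap : a = "apache" <;> by_cases hsp : a = "spark" <;>
          simp [List.headI, hap, hsp, List.count_cons]
      · rw [dif_neg h1]
        have h2 : 2 ≤ xs.length := by
          rcases xs with _ | ⟨a, _ | ⟨b, t⟩⟩
          · exact absurd rfl h0
          · exact absurd rfl h1
          · simp
        have hl := ih ((xs.take (xs.length / 2)).length)
          (by simp only [List.length_take]; omega) (xs.take (xs.length / 2)) rfl
        have hr := ih ((xs.drop (xs.length / 2)).length)
          (by simp only [List.length_drop]; omega) (xs.drop (xs.length / 2)) rfl
        simp only [hl, hr]
        have hc : ∀ w : String,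
            (xs.take (xs.length / 2)).count w + (xs.drop (xs.length / 2)).count w
              = xs.count w := by
          intro w
          conv_rhs => rw [← List.take_append_drop (xs.length / 2) xs]
          rw [List.count_append]
        simp only [Prod.mk.injEq]
        refine ⟨?_, ?_⟩ <;> · rw [← hc]; push_cast; ring

theorem func_fold (iterator : List String) (a b : Int) :
    iterator.foldl (fun (acc : Int × Int) i =>
      let acc := if i == "spark" then (acc.1 + 1, acc.2) else acc
      if i == "apache" then (acc.1, acc.2 + 1) else acc) (a, b)
    = (a + (iterator.count "spark" : Int),
       b + (iterator.count "apache" : Int)) := by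
  induction iterator generalizing a b with
  | nil => simp
  | cons h t ih =>
    simp only [List.foldl_cons]
    by_cases hs : h == "spark" <;> by_cases ha : h == "apache" <;>
      simp only [hs, ha, Bool.false_eq_true, ↓reduceIte] <;>
      rw [ih] <;>
      simp only [beq_iff_eq] at hs ha <;>
      simp only [List.count_cons] <;>
      simp [hs, ha] <;> first | omega | (subst hs; exact absurd ha (by decide))

-- ===== VERDICT (by name: the statement is the Claim_ definition above) =====
theorem func_spec : Claim_equal_func := by
  intro it _
  unfold Spec_func func func_alt
  rw [func_fold, funcGo_eq_count it.length it rfl]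
  simp
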